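-- pv_equiv track=rewrite | github.com/cliclye/predictobics | backend/api/routes.py | _run_snake_draft_greedy_epa
-- ===== SOURCE A (Python) =====
-- def _run_snake_draft_greedy_epa(
--     captains: list[str],
--     pool_sorted_epa: list[str],
--     skip_first_pick: bool,
-- ) -> list[list[str]]:
--     """
--     FRC-style snake: round 1 order 1..8 or (2025+ skip) 2..8 then 1;
--     round 2 order 8..1. Each pick takes the highest-EPA team left in *pool*
--     (pool must be sorted by EPA descending before calling).
--     """
--     pool = list(pool_sorted_epa)
--     alliances = [[c] for c in captains]
--     if skip_first_pick:
--         order_r1 = list(range(1, 8)) + [0]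
--     else:
--         order_r1 = list(range(8))
--     for i in order_r1:
--         if pool:
--             alliances[i].append(pool.pop(0))
--     for i in range(7, -1, -1):
--         if pool:
--             alliances[i].append(pool.pop(0))
--     return alliances
-- ===== SOURCE B (Python) =====
-- def _run_snake_draft_greedy_epa(
--     captains: list[str],
--     pool_sorted_epa: list[str],
--     skip_first_pick: bool,
-- ) -> list[list[str]]:
--     # Closed-form per-alliance construction: alliance i's round-1 pick is pool
--     # index (i-1)%8 (skip variant) or i, its round-2 pick is pool index 15-i;
--     # no draft simulation, no mutable pool.
--     n = len(pool_sorted_epa)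
--     result = []
--     for i, c in enumerate(captains):
--         alliance = [c]
--         if i < 8:
--             r1 = (i - 1) % 8 if skip_first_pick else i
--             if r1 < n:
--                 alliance.append(pool_sorted_epa[r1])
--             r2 = 15 - i
--             if r2 < n:
--                 alliance.append(pool_sorted_epa[r2])
--         result.append(alliance)
--     return result
-- ===== Notes on version B (the rewrite author's own statement) =====
-- stated objective: simpler
-- what changed: B abandons the draft simulation: instead of popping teams off a mutable pool in two ordered pick loops, it constructs each alliance independently from closed-form pool indices ((i-1)%8 or i for round 1, 15-i for round 2), guarded by the pool length.
import Mathlib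
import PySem

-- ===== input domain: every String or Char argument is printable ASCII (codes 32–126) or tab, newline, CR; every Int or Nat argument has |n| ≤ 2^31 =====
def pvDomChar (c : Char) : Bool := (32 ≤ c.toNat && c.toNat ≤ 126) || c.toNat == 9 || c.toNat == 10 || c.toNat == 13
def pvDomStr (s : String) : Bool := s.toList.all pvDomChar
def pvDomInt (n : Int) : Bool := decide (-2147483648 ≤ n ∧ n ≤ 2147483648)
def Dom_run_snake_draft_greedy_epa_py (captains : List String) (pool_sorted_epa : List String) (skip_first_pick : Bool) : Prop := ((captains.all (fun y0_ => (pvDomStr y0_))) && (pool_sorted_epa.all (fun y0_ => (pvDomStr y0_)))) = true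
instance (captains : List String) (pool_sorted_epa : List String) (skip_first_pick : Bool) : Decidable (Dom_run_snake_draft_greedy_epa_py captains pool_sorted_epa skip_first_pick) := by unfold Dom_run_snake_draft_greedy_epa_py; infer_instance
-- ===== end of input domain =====

-- B builds each alliance directly from closed-form pool indices ((i-1)%8 or i, and 15-i)
-- instead of A's sequential draft simulation with two guarded pop(0) loops (objective: simpler).

-- ===== PORT A =====
-- one pick of A's loops: 'if pool: alliances[i].append(pool.pop(0))'
def pvSnakeStep (st : List String × List (List String)) (i : Int) : List String × List (List String) :=
  match st.1 with
  | [] => st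
  | t :: rest => (rest, st.2.set i.toNat ((st.2.getD i.toNat []) ++ [t]))

def run_snake_draft_greedy_epa_py (captains : List String) (pool_sorted_epa : List String) (skip_first_pick : Bool) : List (List String) :=
  let pool := pool_sorted_epa
  let alliances := captains.map (fun c => [c])
  let order_r1 : List Int :=
    if skip_first_pick then PySem.List.pyRange 1 8 1 ++ [0] else PySem.List.pyRange 0 8 1
  let st1 := order_r1.foldl pvSnakeStep (pool, alliances)
  let st2 := (PySem.List.pyRange 7 (-1) (-1)).foldl pvSnakeStep st1
  st2.2

-- ===== PORT B =====
-- per-alliance closed-form picks: round-1 index (i-1)%8 (skip) or i, round-2 index 15-i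
def run_snake_draft_greedy_epa_py_alt (captains : List String) (pool_sorted_epa : List String) (skip_first_pick : Bool) : List (List String) :=
  let n : Int := pool_sorted_epa.length
  (PySem.List.enumerate captains).map (fun p =>
    let i : Int := p.1
    [p.2] ++
      (if i < 8 then
        (let r1 : Int := if skip_first_pick then PySem.Int.mod (i - 1) 8 else i
         if r1 < n then [PySem.List.pyGetD pool_sorted_epa r1 ""] else []) ++
        (let r2 : Int := 15 - i
         if r2 < n then [PySem.List.pyGetD pool_sorted_epa r2 ""] else [])
       else []))

-- ===== PRECONDITION & SPEC =====
-- Pre_ excludes exactly the inputs on which Python A raises IndexError (a pick index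
-- reached while the pool is nonempty falls outside the captains list).
def Pre_run_snake_draft_greedy_epa_py (captains : List String) (pool_sorted_epa : List String) (skip_first_pick : Bool) : Prop :=
  pool_sorted_epa.length = 0 ∨
    captains.length ≥ min (pool_sorted_epa.length + (if skip_first_pick then 1 else 0)) 8
instance (captains : List String) (pool_sorted_epa : List String) (skip_first_pick : Bool) : Decidable (Pre_run_snake_draft_greedy_epa_py captains pool_sorted_epa skip_first_pick) := by unfold Pre_run_snake_draft_greedy_epa_py; infer_instance

def pvWitness_run_snake_draft_greedy_epa_py : List String × List String × Bool :=
  (["c1", "c2", "c3", "c4", "c5", "c6", "c7", "c8"], ["t1", "t2", "t3"], true)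

def Spec_run_snake_draft_greedy_epa_py (captains : List String) (pool_sorted_epa : List String) (skip_first_pick : Bool) (out : List (List String)) : Prop := out = run_snake_draft_greedy_epa_py_alt captains pool_sorted_epa skip_first_pick
instance (captains : List String) (pool_sorted_epa : List String) (skip_first_pick : Bool) (out : List (List String)) : Decidable (Spec_run_snake_draft_greedy_epa_py captains pool_sorted_epa skip_first_pick out) := by unfold Spec_run_snake_draft_greedy_epa_py; infer_instance

-- ===== CLAIM (what is proved, stated in full; the proofs are below) =====
def Claim_equal_run_snake_draft_greedy_epa_py : Prop := ∀ (captains : List String) (pool_sorted_epa : List String) (skip_first_pick : Bool), Dom_run_snake_draft_greedy_epa_py captains pool_sorted_epa skip_first_pick → Pre_run_snake_draft_greedy_epa_py captains pool_sorted_epa skip_first_pick → Spec_run_snake_draft_greedy_epa_py captains pool_sorted_epa skip_first_pick (run_snake_draft_greedy_epa_py captains pool_sorted_epa skip_first_pick)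

-- ===== LEMMAS AND PROOFS =====

-- the full pick order of A's two loops, as one list
def pvOrder (skip : Bool) : List Int :=
  (if skip then PySem.List.pyRange 1 8 1 ++ [0] else PySem.List.pyRange 0 8 1)
    ++ PySem.List.pyRange 7 (-1) (-1)

-- one zip-indexed pick, acting on the alliances alone
def pvStepZ (al : List (List String)) (p : Int × String) : List (List String) :=
  al.set p.1.toNat ((al.getD p.1.toNat []) ++ [p.2])

-- B's closed-form pick list for alliance index i (mirrors the body of the B port)
def pvPicks (skip : Bool) (pool : List String) (i : Int) : List String :=
  if i < 8 then
    (let r1 : Int := if skip then PySem.Int.mod (i - 1) 8 else i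
     if r1 < (pool.length : Int) then [PySem.List.pyGetD pool r1 ""] else []) ++
    (let r2 : Int := 15 - i
     if r2 < (pool.length : Int) then [PySem.List.pyGetD pool r2 ""] else [])
  else []

-- once the pool is empty, A's loop leaves the state unchanged
theorem pvFold_empty (order : List Int) (al : List (List String)) :
    order.foldl pvSnakeStep ([], al) = ([], al) := by
  induction order with
  | nil => rfl
  | cons i rest ih => simpa [pvSnakeStep] using ih

-- A's guarded pop(0) fold equals the fold of pvStepZ over the zip of order and pool
theorem pvFold_eq_zip (order : List Int) (pool : List String) (al : List (List String)) :
    (order.foldl pvSnakeStep (pool, al)).2 = (order.zip pool).foldl pvStepZ al := by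
  induction order generalizing pool al with
  | nil => rfl
  | cons i rest ih =>
    cases pool with
    | nil => simp [pvSnakeStep, pvFold_empty]
    | cons t ts => simpa [pvSnakeStep, pvStepZ] using ih ts _

theorem pvFoldZ_length (ps : List (Int × String)) (al : List (List String)) :
    (ps.foldl pvStepZ al).length = al.length := by
  induction ps generalizing al with
  | nil => rfl
  | cons p ps ih => simp [pvStepZ, ih]

-- the fold appends, at index j, exactly the teams whose pick index is j
theorem pvFoldZ_getD (ps : List (Int × String)) (al : List (List String)) (j : Nat)
    (hj : j < al.length) :
    (ps.foldl pvStepZ al).getD j [] =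
      al.getD j [] ++ ((ps.filter (fun p => p.1.toNat == j)).map Prod.snd) := by
  induction ps generalizing al with
  | nil => simp
  | cons p ps ih =>
    have hlen : j < (pvStepZ al p).length := by simpa [pvStepZ] using hj
    rw [List.foldl_cons, ih _ hlen]
    by_cases h : p.1.toNat = j
    · subst h
      simp [pvStepZ, List.filter_cons, List.getD, List.getElem?_set, hj]
    · simp [pvStepZ, List.filter_cons, h, List.getD, List.getElem?_set, Ne.symm h]

-- filter-of-zip rewritten positionally
theorem pvZipFilter (os : List Int) (pool : List String) (j : Nat) :
    ((os.zip pool).filter (fun p => p.1.toNat == j)).map Prod.snd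
      = (List.range os.length).flatMap
          (fun k => if (os.getD k 0).toNat == j then (pool[k]?).toList else []) := by
  induction os generalizing pool with
  | nil => simp
  | cons i os ih =>
    cases pool with
    | nil => simp
    | cons t ts =>
      rw [List.length_cons, List.range_succ_eq_map]
      simp only [List.flatMap_cons, List.flatMap_map]
      by_cases h : i.toNat = j <;>
        simp [List.filter_cons, h, ih ts, Function.comp]

theorem pvOptPick (pool : List String) (k : Nat) :
    (pool[k]?).toList
      = (if ((k : Int)) < (pool.length : Int) then [PySem.List.pyGetD pool (k : Int) ""] else []) := by
  by_cases h : k < pool.length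
  · rw [if_pos (by exact_mod_cast h)]
    simp [List.getElem?_eq_getElem h, PySem.List.pyGetD_natCast, List.getD_eq_getElem, h]
  · rw [if_neg (by exact_mod_cast h)]
    have h' : pool.length ≤ k := Nat.le_of_not_lt h
    simp [List.getElem?_eq_none_iff.mpr h']

-- the picks A makes at alliance j are B's closed-form picks
theorem pvFilter_eq_picks (skip : Bool) (pool : List String) (j : Nat) :
    (((pvOrder skip).zip pool).filter (fun p => p.1.toNat == j)).map Prod.snd
      = pvPicks skip pool (j : Int) := by
  rw [pvZipFilter]
  rcases j with _|_|_|_|_|_|_|_|j <;> cases skip <;>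
    simp [pvOrder, pvPicks, pvOptPick, PySem.List.pyRange, PySem.Int.mod, List.range_succ,
          PySem.List.pyGetD_ofNat', PySem.List.pyGetD_natCast, List.getD] <;>
    (intro h; exact absurd h (by push_cast; omega))

-- ===== VERDICT (by name: the statement is the Claim_ definition above) =====
theorem run_snake_draft_greedy_epa_py_spec : Claim_equal_run_snake_draft_greedy_epa_py := by
  intro captains pool skip _ _
  show run_snake_draft_greedy_epa_py captains pool skip
    = run_snake_draft_greedy_epa_py_alt captains pool skip
  have hA : run_snake_draft_greedy_epa_py captains pool skip
      = ((pvOrder skip).zip pool).foldl pvStepZ (captains.map (fun c => [c])) := by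
    simp only [run_snake_draft_greedy_epa_py, pvOrder]
    rw [← List.foldl_append, pvFold_eq_zip]
  rw [hA]
  apply List.ext_getElem
  · simp [pvFoldZ_length, run_snake_draft_greedy_epa_py_alt, PySem.List.length_enumerate]
  · intro j h1 h2
    have hj : j < (captains.map (fun c => [c])).length := by
      simpa [pvFoldZ_length] using h1
    have hc : j < captains.length := by simpa using hj
    rw [← List.getD_eq_getElem _ [] h1, pvFoldZ_getD _ _ _ hj, pvFilter_eq_picks]
    simp [run_snake_draft_greedy_epa_py_alt, PySem.List.getElem_enumerate, pvPicks,
          List.getD, List.getElem?_eq_getElem hc]
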